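-- pv_equiv track=rewrite | github.com/spyrosdran/Thesis | Server/evaluator.py | count_eval
-- ===== SOURCE A (Python) =====
-- def count_eval(prediction):
--     classified = []
--
--     for item in prediction:
--         if item[0] > item[1]:
--             classified.append(0)
--         else:
--             classified.append(1)
--
--     positive = sum(classified)
--     negative = len(classified) - positive
--
--     # Replacing the values with labels
--     for i in range(len(classified)):
--         if classified[i] == 0:
--             classified[i] = "negative"
--         else:
--             classified[i] = "positive"
--
--     if positive > negative:
--         sentiment = "positive"
--     elif positive < negative:
--         sentiment = "negative"
--     else:
--         sentiment = "neutral"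
--
--     return sentiment, classified, positive, negative
-- ===== SOURCE B (Python) =====
-- def count_eval(prediction):
--     classified = []
--     positive = 0
--     negative = 0
--     for item in prediction:
--         if item[0] > item[1]:
--             classified.append("negative")
--             negative += 1
--         else:
--             classified.append("positive")
--             positive += 1
--     if positive > negative:
--         sentiment = "positive"
--     elif positive < negative:
--         sentiment = "negative"
--     else:
--         sentiment = "neutral"
--     return sentiment, classified, positive, negative
-- ===== Notes on version B (the rewrite author's own statement) =====
-- stated objective: simpler
-- what changed: B does everything in a single pass that appends the final string label and increments a positive/negative counter directly, removing A's numeric 0/1 intermediate list, the separate sum pass and the in-place relabel pass.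
import Mathlib
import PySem

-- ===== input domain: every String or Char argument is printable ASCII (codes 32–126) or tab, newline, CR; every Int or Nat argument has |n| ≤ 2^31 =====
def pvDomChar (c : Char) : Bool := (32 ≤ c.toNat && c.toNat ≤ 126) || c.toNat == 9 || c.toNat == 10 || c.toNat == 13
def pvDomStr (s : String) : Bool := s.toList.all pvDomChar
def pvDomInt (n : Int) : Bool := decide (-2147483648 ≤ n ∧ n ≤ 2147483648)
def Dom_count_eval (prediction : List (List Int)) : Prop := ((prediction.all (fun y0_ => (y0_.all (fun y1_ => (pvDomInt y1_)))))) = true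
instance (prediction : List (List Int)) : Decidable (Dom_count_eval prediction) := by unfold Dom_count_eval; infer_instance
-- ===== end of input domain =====

-- B is a single pass that appends the final string label and counts positives/negatives directly,
-- replacing A's numeric 0/1 list, sum pass and in-place relabel pass (objective: simpler).

-- ===== PORT A =====
-- item[0] / item[1]: PySem.List.pyGet?; the .getD 0 default is never reached inside Pre_.
def count_eval (prediction : List (List Int)) : String × List String × Int × Int :=
  let classified : List Int := prediction.foldl (fun acc item =>
    if (PySem.List.pyGet? item 0).getD 0 > (PySem.List.pyGet? item 1).getD 0
    then acc ++ [0] else acc ++ [1]) []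
  let positive : Int := classified.foldl (· + ·) 0
  let negative : Int := (classified.length : Int) - positive
  let labels : List String := classified.map (fun c => if c = 0 then "negative" else "positive")
  let sentiment : String :=
    if positive > negative then "positive"
    else if positive < negative then "negative"
    else "neutral"
  (sentiment, labels, positive, negative)

-- ===== PORT B =====
def count_eval_alt (prediction : List (List Int)) : String × List String × Int × Int :=
  let st : List String × Int × Int := prediction.foldl (fun acc item =>
    if (PySem.List.pyGet? item 0).getD 0 > (PySem.List.pyGet? item 1).getD 0
    then (acc.1 ++ ["negative"], acc.2.1 + 1, acc.2.2)
    else (acc.1 ++ ["positive"], acc.2.1, acc.2.2 + 1)) ([], 0, 0)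
  let sentiment : String :=
    if st.2.2 > st.2.1 then "positive"
    else if st.2.2 < st.2.1 then "negative"
    else "neutral"
  (sentiment, st.1, st.2.2, st.2.1)

-- ===== PRECONDITION & SPEC =====
-- A raises IndexError on any item with fewer than two entries; Pre_ excludes exactly those inputs.
def Pre_count_eval (prediction : List (List Int)) : Prop :=
  (prediction.all (fun item => 2 ≤ item.length)) = true
instance (prediction : List (List Int)) : Decidable (Pre_count_eval prediction) := by
  unfold Pre_count_eval; infer_instance
def pvWitness_count_eval : List (List Int) := [[3, 1], [0, 0], [1, 2]]

def Spec_count_eval (prediction : List (List Int)) (out : String × List String × Int × Int) : Prop := out = count_eval_alt prediction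
instance (prediction : List (List Int)) (out : String × List String × Int × Int) : Decidable (Spec_count_eval prediction out) := by unfold Spec_count_eval; infer_instance

-- ===== CLAIM (what is proved, stated in full; the proofs are below) =====
def Claim_equal_count_eval : Prop := ∀ (prediction : List (List Int)), Dom_count_eval prediction → Pre_count_eval prediction → Spec_count_eval prediction (count_eval prediction)

-- ===== LEMMAS AND PROOFS =====

-- the per-item test both loops make
def pvNeg (item : List Int) : Bool :=
  decide ((PySem.List.pyGet? item 0).getD 0 > (PySem.List.pyGet? item 1).getD 0)

lemma pvA_fold_eq (prediction : List (List Int)) (acc : List Int) :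
    prediction.foldl (fun acc item =>
      if (PySem.List.pyGet? item 0).getD 0 > (PySem.List.pyGet? item 1).getD 0
      then acc ++ [0] else acc ++ [1]) acc
    = acc ++ prediction.map (fun item => if pvNeg item then (0 : Int) else 1) := by
  induction prediction generalizing acc with
  | nil => simp
  | cons x xs ih =>
    simp only [List.foldl_cons, List.map_cons, pvNeg]
    by_cases h : (PySem.List.pyGet? x 0).getD 0 > (PySem.List.pyGet? x 1).getD 0 <;>
      simp [h, ih, pvNeg, List.append_assoc]

lemma pvSum_fold (l : List Int) (s : Int) : l.foldl (· + ·) s = s + l.sum := by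
  induction l generalizing s with
  | nil => simp
  | cons x xs ih => simp [List.foldl_cons, ih, List.sum_cons]; ring

def pvS (prediction : List (List Int)) : Int :=
  (prediction.map (fun item => if pvNeg item then (0 : Int) else 1)).sum

lemma pvB_fold_eq (prediction : List (List Int)) (acc : List String) (n p : Int) :
    prediction.foldl (fun acc item =>
      if (PySem.List.pyGet? item 0).getD 0 > (PySem.List.pyGet? item 1).getD 0
      then (acc.1 ++ ["negative"], acc.2.1 + 1, acc.2.2)
      else (acc.1 ++ ["positive"], acc.2.1, acc.2.2 + 1)) (acc, n, p)
    = (acc ++ prediction.map (fun item => if pvNeg item then "negative" else "positive"),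
       n + ((prediction.length : Int) - pvS prediction), p + pvS prediction) := by
  induction prediction generalizing acc n p with
  | nil => simp [pvS]
  | cons x xs ih =>
    simp only [List.foldl_cons, pvNeg, pvS, List.map_cons, List.sum_cons, List.length_cons]
    by_cases h : (PySem.List.pyGet? x 0).getD 0 > (PySem.List.pyGet? x 1).getD 0
    · simp [h, ih, pvS, pvNeg, List.append_assoc]
      ring
    · simp [h, ih, pvS, pvNeg, List.append_assoc]
      exact ⟨by ring, by ring⟩

lemma pvLabel_map (prediction : List (List Int)) :
    (prediction.map (fun item => if pvNeg item then (0 : Int) else 1)).map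
      (fun c => if c = 0 then "negative" else "positive")
    = prediction.map (fun item => if pvNeg item then "negative" else "positive") := by
  simp only [List.map_map]
  refine List.map_congr_left (fun item _ => ?_)
  by_cases h : pvNeg item <;> simp [h]

-- ===== VERDICT (by name: the statement is the Claim_ definition above) =====
theorem count_eval_spec : Claim_equal_count_eval := by
  intro prediction _ _
  unfold Spec_count_eval count_eval count_eval_alt
  simp only [pvA_fold_eq, List.nil_append, pvB_fold_eq, pvSum_fold, zero_add, pvLabel_map]
  simp only [pvS, List.length_map]
  split_ifs <;> rfl
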